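-- pv_equiv track=rewrite | github.com/steqa/wordi | lesson/utils.py | get_feedback_and_num_correct
-- ===== SOURCE A (Python) =====
-- def get_feedback_and_num_correct(
--         user_answers: dict, correct_answers: dict) -> tuple[dict, int]:
--     num_correct = 0
--     feedback = {}
--     for card_id, user_answer in user_answers.items():
--         if card_id.isnumeric() and card_id in correct_answers:
--             if user_answer == correct_answers[card_id]:
--                 num_correct += 1
--                 feedback[card_id] = 'correct'
--             else:
--                 feedback[card_id] = 'incorrect'
--     return feedback, num_correct
-- ===== SOURCE B (Python) =====
-- def get_feedback_and_num_correct(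
--         user_answers: dict, correct_answers: dict) -> tuple[dict, int]:
--     eligible = {k for k in user_answers.keys() & correct_answers.keys()
--                 if k.isnumeric()}
--     correct_keys = ({k for k, _ in user_answers.items() & correct_answers.items()}
--                     & eligible)
--     feedback = {k: ('correct' if k in correct_keys else 'incorrect')
--                 for k in user_answers if k in eligible}
--     return feedback, len(correct_keys)
-- ===== Notes on version B (the rewrite author's own statement) =====
-- stated objective: alternative
-- what changed: A's fused per-entry loop (isnumeric test, lookup into correct_answers, compare, running counter) is replaced by a set-algebra join: intersect the dict key views and item views to get the eligible-key set and the correct-key set, render feedback by membership in those sets (no lookup into correct_answers), and take num_correct = len(correct_keys).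
import Mathlib
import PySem

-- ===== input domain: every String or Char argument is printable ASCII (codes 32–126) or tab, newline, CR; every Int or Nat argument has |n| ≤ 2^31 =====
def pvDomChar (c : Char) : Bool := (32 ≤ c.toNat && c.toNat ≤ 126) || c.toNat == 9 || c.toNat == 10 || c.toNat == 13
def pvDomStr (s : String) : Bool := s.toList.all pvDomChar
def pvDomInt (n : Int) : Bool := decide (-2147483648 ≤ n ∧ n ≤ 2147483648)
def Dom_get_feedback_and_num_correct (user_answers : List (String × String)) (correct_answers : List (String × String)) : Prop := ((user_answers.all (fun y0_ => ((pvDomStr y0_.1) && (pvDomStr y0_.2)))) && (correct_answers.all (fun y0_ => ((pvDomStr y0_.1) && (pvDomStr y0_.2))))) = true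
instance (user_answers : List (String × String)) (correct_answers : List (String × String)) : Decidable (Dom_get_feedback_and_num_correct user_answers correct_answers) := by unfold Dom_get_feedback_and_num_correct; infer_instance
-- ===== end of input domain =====

-- B replaces A's fused per-entry loop (lookup + compare + running counter) by a set-algebra join:
-- key-view and item-view intersections give the eligible and correct key sets, feedback is rendered
-- by membership in those sets, and num_correct = len(correct_keys) (objective: alternative).


-- ===== PORT A =====
-- The dicts are association lists (insertion order, first-match lookup: List.lookup).
-- On the ASCII domain 'card_id.isnumeric()' coincides with str.isdigit, ported as PySem.Str.strIsdigit.
def get_feedback_and_num_correct (user_answers : List (String × String)) (correct_answers : List (String × String)) : (List (String × String)) × Int :=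
  -- num_correct = 0; feedback = {}; fused loop over user_answers.items()
  let st := user_answers.foldl
    (fun (st : Int × PySem.Dict String String) p =>
      if PySem.Str.strIsdigit p.1 && (List.lookup p.1 correct_answers).isSome then
        if p.2 == (List.lookup p.1 correct_answers).getD "" then
          (st.1 + 1, st.2.insert p.1 "correct")
        else
          (st.1, st.2.insert p.1 "incorrect")
      else st)
    ((0 : Int), PySem.Dict.empty)
  (st.2.items, st.1)

-- ===== PORT B =====
def get_feedback_and_num_correct_alt (user_answers : List (String × String)) (correct_answers : List (String × String)) : (List (String × String)) × Int :=
  -- eligible = {k for k in user_answers.keys() & correct_answers.keys() if k.isnumeric()}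
  let eligible : PySem.Set String :=
    PySem.Set.ofList
      (((PySem.Set.ofList (user_answers.map Prod.fst)).inter (correct_answers.map Prod.fst)).filter
        (fun k => PySem.Str.strIsdigit k))
  -- correct_keys = {k for k, _ in user_answers.items() & correct_answers.items()} & eligible
  let correct_keys : PySem.Set String :=
    (PySem.Set.ofList (((PySem.Set.ofList user_answers).inter correct_answers).map Prod.fst)).inter eligible
  -- feedback = {k: 'correct' if k in correct_keys else 'incorrect' for k in user_answers if k in eligible}
  let feedback := (user_answers.map Prod.fst).foldl
    (fun (d : PySem.Dict String String) k =>
      if PySem.Set.contains eligible k then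
        d.insert k (if PySem.Set.contains correct_keys k then "correct" else "incorrect")
      else d)
    PySem.Dict.empty
  (feedback.items, PySem.Set.len correct_keys)

-- ===== PRECONDITION & SPEC =====
-- Pre_ excludes association lists with a repeated key in either argument: a Python dict cannot
-- hold duplicate keys, so such lists do not represent any input A runs on (A's counter and
-- first-match lookup would treat repeated keys arbitrarily).
def Pre_get_feedback_and_num_correct (user_answers : List (String × String)) (correct_answers : List (String × String)) : Prop :=
  (user_answers.map Prod.fst).Nodup ∧ (correct_answers.map Prod.fst).Nodup
instance (user_answers : List (String × String)) (correct_answers : List (String × String)) : Decidable (Pre_get_feedback_and_num_correct user_answers correct_answers) := by unfold Pre_get_feedback_and_num_correct; infer_instance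

def pvWitness_get_feedback_and_num_correct : (List (String × String)) × (List (String × String)) :=
  ([("1", "cat"), ("2", "dog"), ("x", "bird")], [("1", "cat"), ("2", "fox")])

def Spec_get_feedback_and_num_correct (user_answers : List (String × String)) (correct_answers : List (String × String)) (out : (List (String × String)) × Int) : Prop := out = get_feedback_and_num_correct_alt user_answers correct_answers
instance (user_answers : List (String × String)) (correct_answers : List (String × String)) (out : (List (String × String)) × Int) : Decidable (Spec_get_feedback_and_num_correct user_answers correct_answers out) := by unfold Spec_get_feedback_and_num_correct; infer_instance

-- ===== CLAIM (what is proved, stated in full; the proofs are below) =====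
def Claim_equal_get_feedback_and_num_correct : Prop := ∀ (user_answers : List (String × String)) (correct_answers : List (String × String)), Dom_get_feedback_and_num_correct user_answers correct_answers → Pre_get_feedback_and_num_correct user_answers correct_answers → Spec_get_feedback_and_num_correct user_answers correct_answers (get_feedback_and_num_correct user_answers correct_answers)

-- ===== LEMMAS AND PROOFS =====

-- Abbreviations for B's two sets (proof-only helpers; identical to the port's let-bound terms).
def pvE (ca : List (String × String)) (k : String) : Bool :=
  PySem.Str.strIsdigit k && (List.lookup k ca).isSome

def pvElig (ua ca : List (String × String)) : PySem.Set String :=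
  PySem.Set.ofList
    (((PySem.Set.ofList (ua.map Prod.fst)).inter (ca.map Prod.fst)).filter
      (fun k => PySem.Str.strIsdigit k))

def pvCK (ua ca : List (String × String)) : PySem.Set String :=
  (PySem.Set.ofList (((PySem.Set.ofList ua).inter ca).map Prod.fst)).inter (pvElig ua ca)

-- With distinct keys, pair membership and first-match lookup coincide.
theorem pv_lookup_mem (k v : String) (l : List (String × String))
    (h : (l.map Prod.fst).Nodup) : (k, v) ∈ l ↔ List.lookup k l = some v := by
  induction l with
  | nil => simp
  | cons p r ih =>
    obtain ⟨a, b⟩ := p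
    simp only [List.map_cons, List.nodup_cons, List.mem_map, not_exists] at h
    by_cases hk : k = a
    · subst hk
      have hnr : ∀ w, (k, w) ∉ r := fun w hw => h.1 (k, w) ⟨hw, rfl⟩
      simp [List.lookup, List.mem_cons, hnr, eq_comm]
    · simp [List.lookup, beq_false_of_ne hk, ih h.2, hk, Prod.ext_iff]

theorem pv_mem_elig (ua ca : List (String × String)) (k : String) :
    k ∈ pvElig ua ca ↔ k ∈ ua.map Prod.fst ∧ pvE ca k = true := by
  simp [pvElig, pvE, PySem.Set.mem_ofList, List.mem_filter, PySem.Set.mem_inter]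
  tauto

theorem pv_mem_ck (ua ca : List (String × String)) (k : String) :
    k ∈ pvCK ua ca ↔ (∃ v, (k, v) ∈ ua ∧ (k, v) ∈ ca) ∧ k ∈ pvElig ua ca := by
  simp only [pvCK, PySem.Set.mem_inter, PySem.Set.mem_ofList, List.mem_map]
  constructor
  · rintro ⟨⟨p, ⟨h1, h2⟩, rfl⟩, h3⟩; exact ⟨⟨p.2, h1, h2⟩, h3⟩
  · rintro ⟨⟨v, h1, h2⟩, h3⟩; exact ⟨⟨(k, v), ⟨h1, h2⟩, rfl⟩, h3⟩

-- Pointwise: for an entry of user_answers, A's test "eligible and answer equals the stored one"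
-- is exactly membership of its key in B's correct_keys set.
theorem pv_point (ua ca : List (String × String)) (hua : (ua.map Prod.fst).Nodup)
    (hca : (ca.map Prod.fst).Nodup) (p : String × String) (hp : p ∈ ua) :
    (pvE ca p.1 = true ∧ (p.2 == (List.lookup p.1 ca).getD "") = true) ↔ p.1 ∈ pvCK ua ca := by
  rw [pv_mem_ck, pv_mem_elig]
  constructor
  · rintro ⟨hE, heq⟩
    have hs : (List.lookup p.1 ca).isSome = true := (Bool.and_eq_true _ _ |>.mp hE).2
    obtain ⟨w, hw⟩ := Option.isSome_iff_exists.mp hs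
    have hpw : p.2 = w := by simpa [hw] using heq
    refine ⟨⟨p.2, hp, ?_⟩, List.mem_map_of_mem hp, hE⟩
    rw [pv_lookup_mem _ _ _ hca, hw, hpw]
  · rintro ⟨⟨v, h1, h2⟩, _, hE⟩
    have hv : v = p.2 := by
      have e1 := (pv_lookup_mem _ _ _ hua).mp h1
      have e2 := (pv_lookup_mem p.1 p.2 _ hua).mp (by simpa using hp)
      rw [e1] at e2; exact (Option.some.inj e2)
    subst hv
    have hl := (pv_lookup_mem _ _ _ hca).mp h2
    exact ⟨hE, by simp [hl]⟩

-- A's fused fold splits into "counter of passing entries" plus "dict-only fold".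
theorem pv_split (ca : List (String × String)) (ua : List (String × String)) :
    ∀ (n : Int) (d : PySem.Dict String String),
      ua.foldl
        (fun (st : Int × PySem.Dict String String) p =>
          if PySem.Str.strIsdigit p.1 && (List.lookup p.1 ca).isSome then
            if p.2 == (List.lookup p.1 ca).getD "" then
              (st.1 + 1, st.2.insert p.1 "correct")
            else
              (st.1, st.2.insert p.1 "incorrect")
          else st)
        (n, d)
      = (n + (ua.countP (fun p => pvE ca p.1 && (p.2 == (List.lookup p.1 ca).getD "")) : Int),
         ua.foldl
           (fun (d : PySem.Dict String String) p =>
             if pvE ca p.1 then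
               d.insert p.1 (if p.2 == (List.lookup p.1 ca).getD "" then "correct" else "incorrect")
             else d)
           d) := by
  induction ua with
  | nil => intro n d; simp
  | cons p r ih =>
    intro n d
    simp only [List.foldl_cons, List.countP_cons]
    by_cases hE : pvE ca p.1
    · have hE' : (PySem.Str.strIsdigit p.1 && (List.lookup p.1 ca).isSome) = true := hE
      by_cases he : (p.2 == (List.lookup p.1 ca).getD "") = true
      · simp only [hE', he, if_true, hE, Bool.and_self, ih]
        simp [Prod.ext_iff]
        ring
      · simp only [hE', he, if_true, if_false, Bool.false_eq_true, ih]
        simp [hE]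
    · have hE0 : pvE ca p.1 = false := Bool.eq_false_iff.mpr hE
      have hE' : (PySem.Str.strIsdigit p.1 && (List.lookup p.1 ca).isSome) = false := hE0
      have hpred : (pvE ca p.1 && (p.2 == (List.lookup p.1 ca).getD "")) = false := by
        simp [hE0]
      simp only [hE', Bool.false_eq_true, if_false, ih, hpred]
      simp [hE0]

-- The two dict-building folds agree entrywise on user_answers.
theorem pv_dict (ua ca : List (String × String)) (hua : (ua.map Prod.fst).Nodup)
    (hca : (ca.map Prod.fst).Nodup) :
    ua.foldl
      (fun (d : PySem.Dict String String) p =>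
        if pvE ca p.1 then
          d.insert p.1 (if p.2 == (List.lookup p.1 ca).getD "" then "correct" else "incorrect")
        else d)
      PySem.Dict.empty
    = (ua.map Prod.fst).foldl
        (fun (d : PySem.Dict String String) k =>
          if PySem.Set.contains (pvElig ua ca) k then
            d.insert k (if PySem.Set.contains (pvCK ua ca) k then "correct" else "incorrect")
          else d)
        PySem.Dict.empty := by
  rw [List.foldl_map]
  apply PySem.List.foldl_congr_mem
  intro d p hp
  by_cases hE : pvE ca p.1 = true
  · have helig : PySem.Set.contains (pvElig ua ca) p.1 = true := by
      rw [PySem.Set.contains_iff, pv_mem_elig]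
      exact ⟨List.mem_map_of_mem hp, hE⟩
    rw [if_pos hE, if_pos helig]
    by_cases he : (p.2 == (List.lookup p.1 ca).getD "") = true
    · have hck : PySem.Set.contains (pvCK ua ca) p.1 = true := by
        rw [PySem.Set.contains_iff]
        exact (pv_point ua ca hua hca p hp).mp ⟨hE, he⟩
      rw [if_pos he, if_pos hck]
    · have hck : ¬ PySem.Set.contains (pvCK ua ca) p.1 = true := by
        rw [PySem.Set.contains_iff]
        intro hmem
        exact he ((pv_point ua ca hua hca p hp).mpr hmem).2
      rw [if_neg he, if_neg hck]
  · have helig : ¬ PySem.Set.contains (pvElig ua ca) p.1 = true := by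
      rw [PySem.Set.contains_iff, pv_mem_elig]
      exact fun h => hE h.2
    rw [if_neg hE, if_neg helig]

-- A's counter equals the size of B's correct_keys set.
theorem pv_count (ua ca : List (String × String)) (hua : (ua.map Prod.fst).Nodup)
    (hca : (ca.map Prod.fst).Nodup) :
    (ua.countP (fun p => pvE ca p.1 && (p.2 == (List.lookup p.1 ca).getD "")) : Int)
      = PySem.Set.len (pvCK ua ca) := by
  have h1 : ua.countP (fun p => pvE ca p.1 && (p.2 == (List.lookup p.1 ca).getD ""))
      = ua.countP (fun p => decide (p.1 ∈ pvCK ua ca)) := by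
    apply List.countP_congr
    intro p hp
    rw [Bool.and_eq_true, decide_eq_true_iff]
    exact pv_point ua ca hua hca p hp
  have h2 : ua.countP (fun p => decide (p.1 ∈ pvCK ua ca))
      = (ua.map Prod.fst).countP (fun k => decide (k ∈ pvCK ua ca)) := by
    rw [List.countP_map]; rfl
  have hnod : (pvCK ua ca).Nodup := by
    unfold pvCK; exact PySem.Set.nodup_inter _ _ (PySem.Set.nodup_ofList _)
  have hperm : ((ua.map Prod.fst).filter (fun k => decide (k ∈ pvCK ua ca))).Perm (pvCK ua ca) := by
    rw [List.perm_ext_iff_of_nodup (hua.filter _) hnod]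
    intro k
    rw [List.mem_filter, decide_eq_true_iff]
    constructor
    · exact fun h => h.2
    · intro h
      refine ⟨?_, h⟩
      exact ((pv_mem_elig ua ca k).mp ((pv_mem_ck ua ca k).mp h).2).1
  rw [h1, h2, List.countP_eq_length_filter, hperm.length_eq]
  rfl

-- ===== VERDICT (by name: the statement is the Claim_ definition above) =====
theorem get_feedback_and_num_correct_spec : Claim_equal_get_feedback_and_num_correct := by
  intro ua ca _ hpre
  obtain ⟨hua, hca⟩ := hpre
  unfold Spec_get_feedback_and_num_correct
  unfold get_feedback_and_num_correct get_feedback_and_num_correct_alt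
  simp only []
  rw [pv_split ca ua 0 PySem.Dict.empty]
  rw [pv_dict ua ca hua hca, pv_count ua ca hua hca]
  unfold pvCK pvElig
  rw [zero_add]
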